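-- pv_equiv track=rewrite | github.com/rajlath/rkl_codes | CoderByte/html_end_tag_by_start_tag.py | htmlEndTagByStartTag
-- ===== SOURCE A (Python) =====
-- def htmlEndTagByStartTag(startTag):
--     i = 0
--     tag = ''
--     while i < len(startTag):
--         if startTag[i] == "<":
--             j = i + 1
--             tag = ''
--             while j < len(startTag):
--                 tag += startTag[j]
--                 j += 1
--                 if j == len(startTag):
--                     break
--                 elif startTag[j] in [" ", ">"]:break
--             break
--
--         else:i += 1
--
--
--     return "</" + tag + ">"
-- ===== SOURCE B (Python) =====
-- def htmlEndTagByStartTag(startTag):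
--     idx = startTag.find('<')
--     if idx == -1 or idx + 1 == len(startTag):
--         return '</>'
--     end = idx + 2
--     while end < len(startTag) and startTag[end] not in ' >':
--         end += 1
--     return '</' + startTag[idx + 1:end] + '>'
-- ===== Notes on version B (the rewrite author's own statement) =====
-- stated objective: simpler
-- what changed: Replaces A's nested character-by-character accumulation loops (outer scan for '<', inner loop appending one char at a time with look-ahead breaks) by str.find('<') plus a single boundary scan and one slice; the C-level find/slice makes it measurably faster by a constant factor.
import Mathlib
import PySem

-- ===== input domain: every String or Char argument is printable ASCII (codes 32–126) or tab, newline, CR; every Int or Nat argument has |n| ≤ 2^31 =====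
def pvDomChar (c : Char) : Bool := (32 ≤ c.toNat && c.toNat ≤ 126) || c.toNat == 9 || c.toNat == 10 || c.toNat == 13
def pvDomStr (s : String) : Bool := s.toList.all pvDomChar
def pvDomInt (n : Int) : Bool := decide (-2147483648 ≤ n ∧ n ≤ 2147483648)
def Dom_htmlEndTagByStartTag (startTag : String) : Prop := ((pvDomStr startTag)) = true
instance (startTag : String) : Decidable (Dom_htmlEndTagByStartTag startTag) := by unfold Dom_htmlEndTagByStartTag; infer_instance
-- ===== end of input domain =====

-- B replaces A's nested char-by-char accumulation loops by find + one slice (constant-factor faster in a timing run).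

-- ===== PORT A =====
-- inner while loop of A: tag += startTag[j]; j += 1; break at end or when the NEXT char is ' ' or '>'
def pvAInner : List Char → List Char
  | [] => []
  | c :: rest =>
    c :: (match rest with
          | [] => []
          | d :: _ => if d = ' ' ∨ d = '>' then [] else pvAInner rest)

-- outer while loop of A: advance i until startTag[i] = '<', then run the inner loop on the suffix
def pvAOuter : List Char → List Char
  | [] => []
  | c :: rest => if c = '<' then pvAInner rest else pvAOuter rest

def htmlEndTagByStartTag (startTag : String) : String :=
  String.mk ('<' :: '/' :: pvAOuter startTag.toList ++ ['>'])

-- ===== PORT B =====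
-- B's while loop: number of indices `end` advances past (stops at ' ' or '>' or end of string)
def pvBScan : List Char → Nat
  | [] => 0
  | c :: rest => if c = ' ' ∨ c = '>' then 0 else 1 + pvBScan rest

def htmlEndTagByStartTag_alt (startTag : String) : String :=
  let cs := startTag.toList
  let idx := PySem.Chars.find cs ['<']          -- startTag.find('<')
  if idx = -1 ∨ idx + 1 = (cs.length : Int) then String.mk ['<', '/', '>']
  else
    let start := idx.toNat + 1
    let stop := start + 1 + pvBScan (cs.drop (start + 1))
    -- slice startTag[start:stop] with 0 ≤ start ≤ stop ≤ len: exactly take∘drop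
    String.mk ('<' :: '/' :: (cs.drop start).take (stop - start) ++ ['>'])

-- ===== PRECONDITION & SPEC =====
def Spec_htmlEndTagByStartTag (startTag : String) (out : String) : Prop := out = htmlEndTagByStartTag_alt startTag
instance (startTag : String) (out : String) : Decidable (Spec_htmlEndTagByStartTag startTag out) := by unfold Spec_htmlEndTagByStartTag; infer_instance

-- ===== CLAIM (what is proved, stated in full; the proofs are below) =====
def Claim_equal_htmlEndTagByStartTag : Prop := ∀ (startTag : String), Dom_htmlEndTagByStartTag startTag → Spec_htmlEndTagByStartTag startTag (htmlEndTagByStartTag startTag)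

-- ===== LEMMAS AND PROOFS =====

theorem pvAOuter_not_mem {cs : List Char} (h : '<' ∉ cs) : pvAOuter cs = [] := by
  induction cs with
  | nil => rfl
  | cons c rest ih =>
    simp only [List.mem_cons, not_or] at h
    have hc : c ≠ '<' := fun h' => h.1 h'.symm
    simp [pvAOuter, hc, ih h.2]

theorem pvAInner_take (l : List Char) : pvAInner l = l.take (1 + pvBScan (l.drop 1)) := by
  induction l with
  | nil => rfl
  | cons c rest ih =>
    cases rest with
    | nil => rfl
    | cons d t =>
      have hstep : pvAInner (c :: d :: t) =
          c :: (if d = ' ' ∨ d = '>' then [] else pvAInner (d :: t)) := rfl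
      rw [hstep]
      simp only [List.drop_succ_cons, List.drop_zero, pvBScan]
      by_cases hd : d = ' ' ∨ d = '>'
      · simp [hd]
      · rw [if_neg hd, if_neg hd, ih]
        simp only [List.drop_succ_cons, List.drop_zero]
        rw [show 1 + (1 + pvBScan t) = (1 + pvBScan t) + 1 from by omega,
            List.take_succ_cons]

theorem pvAOuter_at : ∀ (cs : List Char) (n : Nat),
    (∀ i < n, ¬ (['<'] <+: cs.drop i)) → ['<'] <+: cs.drop n →
    pvAOuter cs = pvAInner (cs.drop (n + 1)) := by
  intro cs
  induction cs with
  | nil => intro n _ hp; simp at hp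
  | cons c rest ih =>
    intro n hmin hp
    cases n with
    | zero =>
      simp only [List.drop_zero] at hp
      obtain ⟨t, ht⟩ := hp
      simp at ht
      have hc : c = '<' := ht.1.symm
      simp [pvAOuter, hc]
    | succ m =>
      have hc : c ≠ '<' := by
        intro hc
        exact hmin 0 (Nat.succ_pos m) ⟨rest, by simp [hc]⟩
      simp only [pvAOuter, if_neg hc]
      exact ih m (fun i hi => hmin (i + 1) (by omega)) hp

theorem prefix_drop_toNat_find {cs : List Char} (h : PySem.Chars.find cs ['<'] ≠ -1) :
    ['<'] <+: cs.drop (PySem.Chars.find cs ['<']).toNat ∧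
    ∀ i < (PySem.Chars.find cs ['<']).toNat, ¬ ['<'] <+: cs.drop i := by
  have h0 : 0 ≤ PySem.Chars.find cs ['<'] := by
    have := PySem.Chars.neg_one_le_find cs ['<']
    omega
  exact PySem.Chars.find_spec h0

-- ===== VERDICT (by name: the statement is the Claim_ definition above) =====
theorem htmlEndTagByStartTag_spec : Claim_equal_htmlEndTagByStartTag := by
  intro s _
  unfold Spec_htmlEndTagByStartTag htmlEndTagByStartTag htmlEndTagByStartTag_alt
  set cs := s.toList with hcs
  by_cases hf : PySem.Chars.find cs ['<'] = -1
  · have hni : ¬ (['<'] <:+: cs) := (PySem.Chars.find_eq_neg_one_iff cs ['<']).mp hf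
    have hmem : '<' ∉ cs := by
      intro hm
      obtain ⟨p, q, hpq⟩ := List.append_of_mem hm
      exact hni ⟨p, q, by simp [hpq]⟩
    simp [hf, pvAOuter_not_mem hmem]
  · obtain ⟨hpre, hmin⟩ := prefix_drop_toNat_find hf
    have h0 : 0 ≤ PySem.Chars.find cs ['<'] := by
      have := PySem.Chars.neg_one_le_find cs ['<']; omega
    set n := (PySem.Chars.find cs ['<']).toNat with hn
    have hlt : n < cs.length := by
      rcases hpre with ⟨t, ht⟩
      have : cs.drop n ≠ [] := by intro h; rw [h] at ht; simp at ht
      have := List.drop_eq_nil_iff.not.mp this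
      omega
    have hA : pvAOuter cs = pvAInner (cs.drop (n + 1)) := pvAOuter_at cs n hmin hpre
    by_cases hend : PySem.Chars.find cs ['<'] + 1 = (cs.length : Int)
    · have hnil : cs.drop (n + 1) = [] := by
        apply List.drop_eq_nil_iff.mpr
        omega
      simp [hf, hend, hA, hnil, pvAInner]
    · have hcond : ¬ (PySem.Chars.find cs ['<'] = -1 ∨
          PySem.Chars.find cs ['<'] + 1 = (cs.length : Int)) := by
        rintro (h | h)
        · exact hf h
        · exact hend h
      have h1 : n + 1 + 1 + pvBScan (cs.drop (n + 1 + 1)) - (n + 1)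
          = 1 + pvBScan ((cs.drop (n + 1)).drop 1) := by
        rw [List.drop_drop]
        omega
      rw [if_neg hcond, hA, pvAInner_take, ← hn]
      show _ = String.mk ('<' :: '/' ::
        List.take (n + 1 + 1 + pvBScan (cs.drop (n + 1 + 1)) - (n + 1)) (cs.drop (n + 1)) ++ ['>'])
      rw [h1]
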